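-- pv_equiv track=rewrite | github.com/GalaxyShadesCat/mut-epi-origin | scripts/build_gene_mutation_table_from_vcf.py | pick_csq_entry
-- ===== SOURCE A (Python) =====
-- def pick_csq_entry(
--     csq_entries: tuple[str, ...],
--     csq_fields: list[str],
--     alt_allele: str,
-- ) -> dict[str, str]:
--     """Pick one CSQ annotation for an ALT allele, preferring PICK=1."""
--     field_index = {name: idx for idx, name in enumerate(csq_fields)}
--     allele_idx = field_index.get("Allele")
--     pick_idx = field_index.get("PICK")
--
--     parsed_entries: list[list[str]] = []
--     for entry in csq_entries:
--         values = entry.split("|")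
--         if len(values) < len(csq_fields):
--             values.extend([""] * (len(csq_fields) - len(values)))
--         parsed_entries.append(values)
--
--     allele_matched = parsed_entries
--     if allele_idx is not None:
--         filtered = [
--             values for values in parsed_entries if values[allele_idx] == alt_allele
--         ]
--         if filtered:
--             allele_matched = filtered
--
--     if pick_idx is not None:
--         picked = [values for values in allele_matched if values[pick_idx] == "1"]
--         if picked:
--             allele_matched = picked
--
--     best = allele_matched[0]
--     result: dict[str, str] = {}
--     for name, idx in field_index.items():
--         result[name] = best[idx]
--     return result
-- ===== SOURCE B (Python) =====
-- def pick_csq_entry(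
--     csq_entries,
--     csq_fields,
--     alt_allele,
-- ):
--     """Pick one CSQ annotation for an ALT allele, preferring PICK=1 (single pass)."""
--     field_index = {name: idx for idx, name in enumerate(csq_fields)}
--     allele_idx = field_index.get("Allele")
--     pick_idx = field_index.get("PICK")
--     n = len(csq_fields)
--
--     best_rank = -1
--     best = None
--     for entry in csq_entries:
--         values = entry.split("|")
--         if len(values) < n:
--             values.extend([""] * (n - len(values)))
--         rank = 0
--         if allele_idx is not None and values[allele_idx] == alt_allele:
--             rank += 2
--         if pick_idx is not None and values[pick_idx] == "1":
--             rank += 1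
--         if rank > best_rank:
--             best_rank = rank
--             best = values
--
--     return {name: best[idx] for name, idx in field_index.items()}
-- ===== Notes on version B (the rewrite author's own statement) =====
-- stated objective: alternative
-- what changed: Replaced A's two conditional filter-cascade passes over the parsed entries by a single pass that keeps the first entry of maximal (allele-match, PICK=1) rank.
import Mathlib
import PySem

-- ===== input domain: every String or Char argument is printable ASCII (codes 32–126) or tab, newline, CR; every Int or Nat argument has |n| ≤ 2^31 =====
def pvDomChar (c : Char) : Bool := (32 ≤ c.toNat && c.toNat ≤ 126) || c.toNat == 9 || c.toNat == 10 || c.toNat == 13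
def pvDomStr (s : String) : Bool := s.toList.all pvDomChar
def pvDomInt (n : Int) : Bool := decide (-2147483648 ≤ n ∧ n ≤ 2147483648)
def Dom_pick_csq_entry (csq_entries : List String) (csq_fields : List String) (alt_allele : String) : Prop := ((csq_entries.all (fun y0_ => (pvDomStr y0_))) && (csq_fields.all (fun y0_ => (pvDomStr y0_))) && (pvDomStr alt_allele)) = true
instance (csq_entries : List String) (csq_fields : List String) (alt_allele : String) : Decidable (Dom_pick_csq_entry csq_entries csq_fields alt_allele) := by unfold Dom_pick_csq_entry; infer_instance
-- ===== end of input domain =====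

-- B replaces A's parse-then-filter-cascade by a single pass keeping the first entry of maximal
-- (allele-match, PICK) rank; equivalence proved for nonempty csq_entries (A raises IndexError on []).


-- ===== PORT A =====
-- shared with B (both Pythons build the same field_index and split/pad entries the same way)
def buildFieldIndex (csq_fields : List String) : PySem.Dict String Int :=
  (PySem.List.enumerate csq_fields 0).foldl (fun d p => d.insert p.2 p.1) PySem.Dict.empty

def padSplit (nfields : Nat) (entry : String) : List String :=
  let values := (PySem.Str.split? entry "|").getD []  -- sep "|" ≠ "" so split? is always some
  if values.length < nfields then values ++ List.replicate (nfields - values.length) "" else values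

-- result = {name: best[idx] for name, idx in field_index.items()} (A's final loop / B's comprehension)
def buildResult (fi : PySem.Dict String Int) (best : List String) : List (String × String) :=
  (fi.items.foldl (fun d p => d.insert p.1 (PySem.List.pyGetD best p.2 "")) PySem.Dict.empty).items

def pick_csq_entry (csq_entries : List String) (csq_fields : List String) (alt_allele : String) : List (String × String) :=
  let fi := buildFieldIndex csq_fields
  let allele_idx := fi.get? "Allele"
  let pick_idx := fi.get? "PICK"
  let parsed := csq_entries.foldl (fun acc e => acc ++ [padSplit csq_fields.length e]) []
  let allele_matched :=
    match allele_idx with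
    | none => parsed
    | some i =>
      let filtered := parsed.filter (fun v => PySem.List.pyGetD v i "" == alt_allele)
      if filtered.isEmpty then parsed else filtered
  let allele_matched2 :=
    match pick_idx with
    | none => allele_matched
    | some i =>
      let picked := allele_matched.filter (fun v => PySem.List.pyGetD v i "" == "1")
      if picked.isEmpty then allele_matched else picked
  let best := allele_matched2.headD []
  buildResult fi best

-- ===== PORT B =====
-- rank of an entry: +2 for an allele match, +1 for PICK == "1" (B's two if-statements)
def rankOf (allele_idx pick_idx : Option Int) (alt_allele : String) (values : List String) : Nat :=
  (if (match allele_idx with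
       | some i => PySem.List.pyGetD values i "" == alt_allele
       | none => false) then 2 else 0)
  + (if (match pick_idx with
       | some i => PySem.List.pyGetD values i "" == "1"
       | none => false) then 1 else 0)

-- B's loop body: keep the first entry of strictly greater rank
def genStep {α : Type} (f : α → Nat) (st : Option (Nat × α)) (v : α) : Option (Nat × α) :=
  match st with
  | none => some (f v, v)
  | some (r, b) => if r < f v then some (f v, v) else some (r, b)

def pick_csq_entry_alt (csq_entries : List String) (csq_fields : List String) (alt_allele : String) : List (String × String) :=
  let fi := buildFieldIndex csq_fields
  let allele_idx := fi.get? "Allele"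
  let pick_idx := fi.get? "PICK"
  let st := csq_entries.foldl
    (fun st e => genStep (rankOf allele_idx pick_idx alt_allele) st (padSplit csq_fields.length e)) none
  match st with
  | some (_, best) => buildResult fi best
  | none => []

-- ===== PRECONDITION & SPEC =====
-- A evaluates allele_matched[0] and raises IndexError when csq_entries is empty
def Pre_pick_csq_entry (csq_entries : List String) (csq_fields : List String) (alt_allele : String) : Prop :=
  csq_entries ≠ []
instance (csq_entries : List String) (csq_fields : List String) (alt_allele : String) : Decidable (Pre_pick_csq_entry csq_entries csq_fields alt_allele) := by unfold Pre_pick_csq_entry; infer_instance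

def pvWitness_pick_csq_entry : List String × List String × String := (["A|1", "T|0"], ["Allele", "PICK"], "T")

def Spec_pick_csq_entry (csq_entries : List String) (csq_fields : List String) (alt_allele : String) (out : List (String × String)) : Prop := out = pick_csq_entry_alt csq_entries csq_fields alt_allele
instance (csq_entries : List String) (csq_fields : List String) (alt_allele : String) (out : List (String × String)) : Decidable (Spec_pick_csq_entry csq_entries csq_fields alt_allele out) := by unfold Spec_pick_csq_entry; infer_instance

-- ===== CLAIM (what is proved, stated in full; the proofs are below) =====
def Claim_equal_pick_csq_entry : Prop := ∀ (csq_entries : List String) (csq_fields : List String) (alt_allele : String), Dom_pick_csq_entry csq_entries csq_fields alt_allele → Pre_pick_csq_entry csq_entries csq_fields alt_allele → Spec_pick_csq_entry csq_entries csq_fields alt_allele (pick_csq_entry csq_entries csq_fields alt_allele)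

-- ===== LEMMAS AND PROOFS =====

-- combined rank of an element under two predicates
def rk {α : Type} (p q : α → Bool) (v : α) : Nat :=
  (if p v then 2 else 0) + (if q v then 1 else 0)

-- maximum rank over a list
def mx {α : Type} (f : α → Nat) (l : List α) : Nat := (l.map f).foldr max 0

lemma le_mx {α : Type} (f : α → Nat) {l : List α} {v : α} (h : v ∈ l) : f v ≤ mx f l := by
  induction l with
  | nil => cases h
  | cons a t ih =>
    have hsplit : mx f (a :: t) = max (f a) (mx f t) := by simp [mx]
    rcases List.mem_cons.1 h with h | h
    · subst h; omega
    · have := ih h; omega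

lemma mx_le {α : Type} (f : α → Nat) {l : List α} {k : Nat} (h : ∀ v ∈ l, f v ≤ k) : mx f l ≤ k := by
  induction l with
  | nil => simp [mx]
  | cons a t ih =>
    simp only [mx, List.map_cons, List.foldr_cons, max_le_iff]
    exact ⟨h a (by simp), ih (fun v hv => h v (List.mem_cons_of_mem _ hv))⟩

lemma mx_attained {α : Type} (f : α → Nat) {l : List α} (h : mx f l ≠ 0) :
    ∃ v ∈ l, f v = mx f l := by
  induction l with
  | nil => simp [mx] at h
  | cons a t ih =>
    by_cases hle : mx f t ≤ f a
    · exact ⟨a, by simp, by simp [mx] at *; omega⟩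
    · have ht : mx f t ≠ 0 := by omega
      obtain ⟨v, hv, he⟩ := ih ht
      exact ⟨v, List.mem_cons_of_mem _ hv, by simp [mx] at *; omega⟩

lemma filter_mx_ne_nil {α : Type} (f : α → Nat) {l : List α} (h : l ≠ []) :
    l.filter (fun v => f v = mx f l) ≠ [] := by
  by_cases h0 : mx f l = 0
  · have : l.filter (fun v => f v = mx f l) = l := by
      apply List.filter_eq_self.2
      intro v hv
      have := le_mx f hv
      simp; omega
    rw [this]; exact h
  · obtain ⟨v, hv, he⟩ := mx_attained f h0
    intro hnil
    have := List.filter_eq_nil_iff.1 hnil v hv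
    simp [he] at this

-- the fold with strict improvement, started from (r, b), lands on the first element of maximal rank
lemma fold_genStep {α : Type} (f : α → Nat) (l : List α) (r : Nat) (b : α) :
    l.foldl (genStep f) (some (r, b))
      = some (max r (mx f l),
          if mx f l ≤ r then b else (l.filter (fun v => f v = mx f l)).headD b) := by
  induction l generalizing r b with
  | nil => simp [mx]
  | cons a t ih =>
    have hsplit : mx f (a :: t) = max (f a) (mx f t) := by simp [mx]
    rw [List.foldl_cons]
    by_cases hlt : r < f a
    · have hstep : genStep f (some (r, b)) a = some (f a, a) := by simp [genStep, hlt]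
      rw [hstep, ih]
      simp only [Option.some.injEq, Prod.mk.injEq]
      by_cases hta : mx f t ≤ f a
      · have h1 : mx f (a :: t) = f a := by omega
        have hfil : (a :: t).filter (fun v => f v = mx f (a :: t))
            = a :: t.filter (fun v => f v = mx f (a :: t)) := by
          rw [List.filter_cons_of_pos]; simp [h1]
        refine ⟨by omega, ?_⟩
        rw [if_pos hta, if_neg (by omega), hfil, List.headD_cons]
      · have h1 : mx f (a :: t) = mx f t := by omega
        have hne : t.filter (fun v => f v = mx f t) ≠ [] := by
          apply filter_mx_ne_nil
          intro he; rw [he] at hta; simp [mx] at hta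
        have hfil : (a :: t).filter (fun v => f v = mx f (a :: t))
            = t.filter (fun v => f v = mx f t) := by
          rw [h1, List.filter_cons_of_neg]; simp; omega
        refine ⟨by omega, ?_⟩
        rw [if_neg hta, if_neg (by omega), hfil]
        obtain ⟨x, xs, hx⟩ : ∃ x xs, t.filter (fun v => f v = mx f t) = x :: xs := by
          cases hc : t.filter (fun v => f v = mx f t) with
          | nil => exact absurd hc hne
          | cons x xs => exact ⟨x, xs, rfl⟩
        rw [hx]; rfl
    · have hstep : genStep f (some (r, b)) a = some (r, b) := by simp [genStep, hlt]
      rw [hstep, ih]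
      simp only [Option.some.injEq, Prod.mk.injEq]
      by_cases htr : mx f t ≤ r
      · exact ⟨by omega, by rw [if_pos htr, if_pos (by omega)]⟩
      · have h2 : mx f (a :: t) = mx f t := by omega
        have hfil : (a :: t).filter (fun v => f v = mx f (a :: t))
            = t.filter (fun v => f v = mx f t) := by
          rw [h2, List.filter_cons_of_neg]; simp; omega
        refine ⟨by omega, ?_⟩
        rw [if_neg htr, if_neg (by omega), hfil]

-- B's fold from None on a nonempty list: first element of maximal rank
lemma fold_genStep_none {α : Type} (f : α → Nat) (l : List α) (h : l ≠ []) (dflt : α) :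
    l.foldl (genStep f) none
      = some (mx f l, (l.filter (fun v => f v = mx f l)).headD dflt) := by
  cases l with
  | nil => exact absurd rfl h
  | cons a t =>
    rw [List.foldl_cons]
    have hstep : genStep f none a = some (f a, a) := rfl
    rw [hstep, fold_genStep]
    have hsplit : mx f (a :: t) = max (f a) (mx f t) := by simp [mx]
    simp only [Option.some.injEq, Prod.mk.injEq]
    by_cases hta : mx f t ≤ f a
    · have h1 : mx f (a :: t) = f a := by omega
      have hfil : (a :: t).filter (fun v => f v = mx f (a :: t))
          = a :: t.filter (fun v => f v = mx f (a :: t)) := by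
        rw [List.filter_cons_of_pos]; simp [h1]
      refine ⟨by omega, ?_⟩
      rw [if_pos hta, hfil, List.headD_cons]
    · have h1 : mx f (a :: t) = mx f t := by omega
      have hne : t.filter (fun v => f v = mx f t) ≠ [] := by
        apply filter_mx_ne_nil
        intro he; rw [he] at hta; simp [mx] at hta
      have hfil : (a :: t).filter (fun v => f v = mx f (a :: t))
          = t.filter (fun v => f v = mx f t) := by
        rw [h1, List.filter_cons_of_neg]; simp; omega
      refine ⟨by omega, ?_⟩
      rw [if_neg hta, hfil]
      obtain ⟨x, xs, hx⟩ : ∃ x xs, t.filter (fun v => f v = mx f t) = x :: xs := by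
        cases hc : t.filter (fun v => f v = mx f t) with
        | nil => exact absurd hc hne
        | cons x xs => exact ⟨x, xs, rfl⟩
      rw [hx]; rfl

-- A's cascade of two conditional filter passes picks the first element of maximal rank
lemma cascade_eq_firstMax {α : Type} (p q : α → Bool) (l : List α) (h : l ≠ []) (dflt : α) :
    (let F := l.filter p
     let l1 := if F.isEmpty then l else F
     let G := l1.filter q
     let l2 := if G.isEmpty then l1 else G
     l2.headD dflt)
    = (l.filter (fun v => rk p q v = mx (rk p q) l)).headD dflt := by
  dsimp only
  by_cases hF : (l.filter p).isEmpty = true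
  · -- no allele match anywhere
    have hnp : ∀ v ∈ l, p v = false := by
      intro v hv; by_contra hc
      have : v ∈ l.filter p := List.mem_filter.2 ⟨hv, by simpa using hc⟩
      rw [List.isEmpty_iff.1 hF] at this; cases this
    rw [if_pos hF]
    by_cases hG : (l.filter q).isEmpty = true
    · -- nothing matches: rank 0 everywhere
      have hnq : ∀ v ∈ l, q v = false := by
        intro v hv; by_contra hc
        have : v ∈ l.filter q := List.mem_filter.2 ⟨hv, by simpa using hc⟩
        rw [List.isEmpty_iff.1 hG] at this; cases this
      have hm : mx (rk p q) l = 0 :=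
        Nat.le_zero.1 (mx_le _ (fun v hv => by simp [rk, hnp v hv, hnq v hv]))
      have hfe : l.filter (fun v => rk p q v = mx (rk p q) l) = l :=
        List.filter_eq_self.2 (fun v hv => by simp [rk, hnp v hv, hnq v hv, hm])
      rw [if_pos hG, hfe]
    · -- only PICK matches: max rank is 1
      obtain ⟨w, hwl, hwq⟩ : ∃ x ∈ l, q x = true := by
        rw [Bool.not_eq_true] at hG
        obtain ⟨x, hx⟩ := List.isEmpty_eq_false_iff_exists_mem.1 hG
        exact ⟨x, (List.mem_filter.1 hx).1, (List.mem_filter.1 hx).2⟩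
      have hm : mx (rk p q) l = 1 := by
        apply le_antisymm
        · apply mx_le; intro v hv
          cases hq : q v <;> simp [rk, hnp v hv, hq]
        · have := le_mx (rk p q) hwl
          simp [rk, hnp w hwl, hwq] at this; omega
      have hfq : l.filter (fun v => rk p q v = mx (rk p q) l) = l.filter q := by
        apply List.filter_congr
        intro v hv
        cases hq : q v <;> simp [rk, hnp v hv, hq, hm]
      rw [if_neg hG, hfq]
  · -- some allele match
    obtain ⟨w, hwl, hwp⟩ : ∃ x ∈ l, p x = true := by
      rw [Bool.not_eq_true] at hF
      obtain ⟨x, hx⟩ := List.isEmpty_eq_false_iff_exists_mem.1 hF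
      exact ⟨x, (List.mem_filter.1 hx).1, (List.mem_filter.1 hx).2⟩
    rw [if_neg hF]
    by_cases hG : ((l.filter p).filter q).isEmpty = true
    · -- allele matches exist but none of them has PICK=1: max rank is 2
      have hnpq : ∀ v ∈ l, ¬(p v = true ∧ q v = true) := by
        intro v hv hc
        have : v ∈ (l.filter p).filter q :=
          List.mem_filter.2 ⟨List.mem_filter.2 ⟨hv, by simp [hc.1]⟩, by simp [hc.2]⟩
        rw [List.isEmpty_iff.1 hG] at this; cases this
      have hqfalse : ∀ v ∈ l, p v = true → q v = false := by
        intro v hv hp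
        cases hq : q v
        · rfl
        · exact absurd ⟨hp, hq⟩ (hnpq v hv)
      have hm : mx (rk p q) l = 2 := by
        apply le_antisymm
        · apply mx_le; intro v hv
          rcases Bool.eq_false_or_eq_true (p v) with hp | hp
          · simp [rk, hp, hqfalse v hv hp]
          · cases hq : q v <;> simp [rk, hp, hq]
        · have := le_mx (rk p q) hwl
          simp [rk, hwp, hqfalse w hwl hwp] at this; omega
      have hfp : l.filter (fun v => rk p q v = mx (rk p q) l) = l.filter p := by
        apply List.filter_congr
        intro v hv
        rcases Bool.eq_false_or_eq_true (p v) with hp | hp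
        · simp [rk, hp, hqfalse v hv hp, hm]
        · cases hq : q v <;> simp [rk, hp, hq, hm]
      rw [if_pos hG, hfp]
    · -- an allele match with PICK=1: max rank is 3
      obtain ⟨w2, hw2l, hw2p, hw2q⟩ : ∃ x ∈ l, p x = true ∧ q x = true := by
        rw [Bool.not_eq_true] at hG
        obtain ⟨x, hx⟩ := List.isEmpty_eq_false_iff_exists_mem.1 hG
        have h1 := List.mem_filter.1 hx
        have h2 := List.mem_filter.1 h1.1
        exact ⟨x, h2.1, h2.2, h1.2⟩
      have hm : mx (rk p q) l = 3 := by
        apply le_antisymm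
        · apply mx_le; intro v hv
          cases hp : p v <;> cases hq : q v <;> simp [rk, hp, hq]
        · have := le_mx (rk p q) hw2l
          simp [rk, hw2p, hw2q] at this; omega
      have hf3 : l.filter (fun v => rk p q v = mx (rk p q) l) = (l.filter p).filter q := by
        rw [List.filter_filter]
        apply List.filter_congr
        intro v hv
        cases hp : p v <;> cases hq : q v <;> simp [rk, hp, hq, hm]
      rw [if_neg hG, hf3]

-- rankOf is rk of the two effective predicates
lemma rankOf_eq_rk (allele_idx pick_idx : Option Int) (alt_allele : String) :
    rankOf allele_idx pick_idx alt_allele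
      = rk (fun v => match allele_idx with
                     | some i => PySem.List.pyGetD v i "" == alt_allele
                     | none => false)
           (fun v => match pick_idx with
                     | some i => PySem.List.pyGetD v i "" == "1"
                     | none => false) := by
  funext v
  cases allele_idx <;> cases pick_idx <;> rfl

-- ===== VERDICT (by name: the statement is the Claim_ definition above) =====
theorem pick_csq_entry_spec : Claim_equal_pick_csq_entry := by
  intro csq_entries csq_fields alt_allele _ hpre
  unfold Spec_pick_csq_entry pick_csq_entry pick_csq_entry_alt
  simp only [PySem.List.foldl_append_singleton_eq_map, List.nil_append]
  rw [show csq_entries.foldl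
        (fun st e => genStep (rankOf ((buildFieldIndex csq_fields).get? "Allele")
            ((buildFieldIndex csq_fields).get? "PICK") alt_allele) st (padSplit csq_fields.length e)) none
      = (csq_entries.map (padSplit csq_fields.length)).foldl
          (genStep (rankOf ((buildFieldIndex csq_fields).get? "Allele")
            ((buildFieldIndex csq_fields).get? "PICK") alt_allele)) none from List.foldl_map.symm]
  have hPne : csq_entries.map (padSplit csq_fields.length) ≠ [] := by simpa using hpre
  rw [fold_genStep_none _ _ hPne []]
  dsimp only
  congr 1
  rw [rankOf_eq_rk,
      ← cascade_eq_firstMax _ _ (csq_entries.map (padSplit csq_fields.length)) hPne []]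
  cases ha : (buildFieldIndex csq_fields).get? "Allele" <;>
    cases hp : (buildFieldIndex csq_fields).get? "PICK" <;>
      dsimp only <;> simp
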